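-- pv_equiv track=rewrite | github.com/zhanglabtools/TADGATE | TADGATE/TADGATE_utils.py | chr_cut
-- ===== SOURCE A (Python) =====
-- def chr_cut(chr_length, chr_symbol, resolution):
--     """
--     Cut chromosome into bins
--     :param chr_length: int, length of chromosome
--     :param chr_symbol: str, chromosome symbol
--     :param resolution: int, resolution of Hi-C contact map
--     :return: name_list: list, bin symbol along chromosome
--     """
--     start_pos = 0
--     start = []
--     end = []
--     name_list = []
--     while (start_pos + resolution) <= chr_length:
--         start.append(start_pos)
--         end.append(start_pos + resolution)
--         start_pos += resolution
--     start.append(start_pos)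
--     end.append(chr_length)
--     for i in range(len(start)):
--         name_list.append(chr_symbol + ':' + str(start[i]) + '-' + str(end[i]))
--     return name_list
-- ===== SOURCE B (Python) =====
-- def chr_cut(chr_length, chr_symbol, resolution):
--     n = max(0, chr_length // resolution)
--     labels = [f"{chr_symbol}:{i * resolution}-{(i + 1) * resolution}" for i in range(n)]
--     labels.append(f"{chr_symbol}:{n * resolution}-{chr_length}")
--     return labels
-- ===== Notes on version B (the rewrite author's own statement) =====
-- stated objective: simpler
-- what changed: Replaces the while-loop accumulation of separate start/end position lists followed by a second naming pass with one floor division that yields the bin count and a single comprehension emitting each label directly, plus the one trailing bin.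
-- outside the precondition, e.g. on chr_cut(-1, 'c', 0): A returns ['c:0--1'], B raises ZeroDivisionError; on chr_cut(-10, 'c', -3): A returns ['c:0--10'], B returns ['c:0--3', 'c:-3--6', 'c:-6--9', 'c:-9--10']
import Mathlib
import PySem

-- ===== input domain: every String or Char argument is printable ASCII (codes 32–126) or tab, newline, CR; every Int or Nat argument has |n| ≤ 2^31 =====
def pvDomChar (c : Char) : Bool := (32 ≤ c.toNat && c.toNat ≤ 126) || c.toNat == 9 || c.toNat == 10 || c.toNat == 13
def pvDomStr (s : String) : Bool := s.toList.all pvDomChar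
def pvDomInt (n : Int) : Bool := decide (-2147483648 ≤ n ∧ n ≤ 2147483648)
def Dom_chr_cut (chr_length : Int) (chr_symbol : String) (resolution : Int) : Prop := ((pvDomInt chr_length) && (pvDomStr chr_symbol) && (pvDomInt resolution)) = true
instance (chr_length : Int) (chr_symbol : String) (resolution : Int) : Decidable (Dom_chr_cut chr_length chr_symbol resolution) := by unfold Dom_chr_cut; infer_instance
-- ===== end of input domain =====

-- B replaces A's while-loop accumulation of start/end lists plus a second naming pass
-- by one floor division giving the bin count and a single comprehension; objective: simpler.

-- ===== PORT A =====
-- A's while loop, building the start and end lists; the extra '0 < resolution' conjunct in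
-- the guard only makes the recursion total — on resolution ≤ 0 with the loop condition true
-- the Python loop never terminates (those inputs are outside Pre_).
def chr_cut_go (chr_length resolution sp : Int) : List Int × List Int :=
  if _h : sp + resolution ≤ chr_length ∧ 0 < resolution then
    let p := chr_cut_go chr_length resolution (sp + resolution)
    (sp :: p.1, (sp + resolution) :: p.2)
  else ([sp], [chr_length])
termination_by (chr_length - sp).toNat
decreasing_by omega

def chr_cut (chr_length : Int) (chr_symbol : String) (resolution : Int) : List String :=
  let se := chr_cut_go chr_length resolution 0
  (List.range se.1.length).map (fun i =>
    chr_symbol ++ ":" ++ PySem.Int.toStr (se.1.getD i 0) ++ "-" ++ PySem.Int.toStr (se.2.getD i 0))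

-- ===== PORT B =====
def chr_cut_alt (chr_length : Int) (chr_symbol : String) (resolution : Int) : List String :=
  let n : Int := max 0 (PySem.Int.floordiv chr_length resolution)
  ((List.range n.toNat).map (fun (i : Nat) =>
      chr_symbol ++ ":" ++ PySem.Int.toStr ((i : Int) * resolution) ++ "-" ++ PySem.Int.toStr (((i : Int) + 1) * resolution)))
  ++ [chr_symbol ++ ":" ++ PySem.Int.toStr (n * resolution) ++ "-" ++ PySem.Int.toStr chr_length]

-- ===== PRECONDITION & SPEC =====
-- Pre_ excludes resolution ≤ 0: there A's while loop never terminates whenever the loop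
-- condition first holds, and on the remaining degenerate inputs (chr_length < resolution ≤ 0)
-- A returns a single meaningless bin for a non-positive resolution while B's floor division
-- raises ZeroDivisionError (resolution = 0) or bins in the wrong direction.
def Pre_chr_cut (chr_length : Int) (chr_symbol : String) (resolution : Int) : Prop := 0 < resolution
instance (chr_length : Int) (chr_symbol : String) (resolution : Int) : Decidable (Pre_chr_cut chr_length chr_symbol resolution) := by unfold Pre_chr_cut; infer_instance
def pvWitness_chr_cut : Int × String × Int := (10, "chr1", 3)

def Spec_chr_cut (chr_length : Int) (chr_symbol : String) (resolution : Int) (out : List String) : Prop := out = chr_cut_alt chr_length chr_symbol resolution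
instance (chr_length : Int) (chr_symbol : String) (resolution : Int) (out : List String) : Decidable (Spec_chr_cut chr_length chr_symbol resolution out) := by unfold Spec_chr_cut; infer_instance

-- ===== CLAIM (what is proved, stated in full; the proofs are below) =====
def Claim_equal_chr_cut : Prop := ∀ (chr_length : Int) (chr_symbol : String) (resolution : Int), Dom_chr_cut chr_length chr_symbol resolution → Pre_chr_cut chr_length chr_symbol resolution → Spec_chr_cut chr_length chr_symbol resolution (chr_cut chr_length chr_symbol resolution)

-- ===== LEMMAS AND PROOFS =====

def mkName (sym : String) (a b : Int) : String :=
  sym ++ ":" ++ PySem.Int.toStr a ++ "-" ++ PySem.Int.toStr b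

-- loop-exit case, shared by both fuel branches
theorem chr_cut_go_names_base (L res : Int) (hres : 0 < res) (sym : String) (sp : Int)
    (hnc : ¬ (sp + res ≤ L)) :
    (List.range (chr_cut_go L res sp).1.length).map (fun i =>
        sym ++ ":" ++ PySem.Int.toStr ((chr_cut_go L res sp).1.getD i 0) ++ "-" ++
          PySem.Int.toStr ((chr_cut_go L res sp).2.getD i 0))
    = ((List.range (max 0 (PySem.Int.floordiv (L - sp) res)).toNat).map (fun (i : Nat) =>
          mkName sym (sp + (i : Int) * res) (sp + ((i : Int) + 1) * res)))
      ++ [mkName sym (sp + (max 0 (PySem.Int.floordiv (L - sp) res)) * res) L] := by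
  have hlt : PySem.Int.floordiv (L - sp) res < 1 := by
    rw [PySem.Int.floordiv_lt_iff_lt_mul hres]; omega
  have hmax : max 0 (PySem.Int.floordiv (L - sp) res) = 0 := by omega
  rw [chr_cut_go, dif_neg (by omega)]
  rw [hmax]
  simp [mkName]

-- names produced from the loop state starting at sp, in closed form
theorem chr_cut_go_names (L res : Int) (hres : 0 < res) (sym : String) :
    ∀ (fuel : Nat) (sp : Int), (L - sp).toNat ≤ fuel →
    (List.range (chr_cut_go L res sp).1.length).map (fun i =>
        sym ++ ":" ++ PySem.Int.toStr ((chr_cut_go L res sp).1.getD i 0) ++ "-" ++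
          PySem.Int.toStr ((chr_cut_go L res sp).2.getD i 0))
    = ((List.range (max 0 (PySem.Int.floordiv (L - sp) res)).toNat).map (fun (i : Nat) =>
          mkName sym (sp + (i : Int) * res) (sp + ((i : Int) + 1) * res)))
      ++ [mkName sym (sp + (max 0 (PySem.Int.floordiv (L - sp) res)) * res) L] := by
  intro fuel
  induction fuel with
  | zero =>
      intro sp hfuel
      have hnc : ¬ (sp + res ≤ L) := by omega
      exact chr_cut_go_names_base L res hres sym sp hnc
  | succ f ih =>
      intro sp hfuel
      by_cases hc : sp + res ≤ L
      · rw [chr_cut_go]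
        rw [dif_pos ⟨hc, hres⟩]
        simp only [List.length_cons, List.range_succ_eq_map, List.map_cons, List.map_map,
          List.getD_cons_zero, Function.comp_def, List.getD_cons_succ]
        rw [ih (sp + res) (by omega)]
        have hq1 : 1 ≤ PySem.Int.floordiv (L - sp) res := by
          rw [PySem.Int.le_floordiv_iff_mul_le hres]; omega
        have hspec := (PySem.Int.floordiv_eq_iff_of_pos hres
          (q := PySem.Int.floordiv (L - sp) res) (a := L - sp)).mp rfl
        have hstep : PySem.Int.floordiv (L - (sp + res)) res = PySem.Int.floordiv (L - sp) res - 1 := by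
          rw [PySem.Int.floordiv_eq_iff_of_pos hres]
          constructor
          · nlinarith [hspec.1]
          · nlinarith [hspec.2]
        rw [hstep]
        have hmax1 : max 0 (PySem.Int.floordiv (L - sp) res - 1) = PySem.Int.floordiv (L - sp) res - 1 := by omega
        have hmax2 : max 0 (PySem.Int.floordiv (L - sp) res) = PySem.Int.floordiv (L - sp) res := by omega
        rw [hmax1, hmax2]
        have hrange : (PySem.Int.floordiv (L - sp) res).toNat = (PySem.Int.floordiv (L - sp) res - 1).toNat + 1 := by omega
        rw [hrange, List.range_succ_eq_map, List.map_cons, List.map_map]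
        simp only [List.cons_append]
        congr 1
        · simp [mkName]
        congr 1
        · apply List.map_congr_left
          intro i _
          simp only [Function.comp_def]
          unfold mkName
          push_cast
          ring_nf
        · have : sp + res + (PySem.Int.floordiv (L - sp) res - 1) * res
              = sp + PySem.Int.floordiv (L - sp) res * res := by ring
          rw [this]
      · exact chr_cut_go_names_base L res hres sym sp hc

-- ===== VERDICT (by name: the statement is the Claim_ definition above) =====
theorem chr_cut_spec : Claim_equal_chr_cut := by
  intro L sym res _hdom hres
  unfold Spec_chr_cut chr_cut chr_cut_alt
  have h := chr_cut_go_names L res hres sym (L - 0).toNat 0 le_rfl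
  simp only [sub_zero] at h
  rw [h]
  simp [mkName, zero_add]
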